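-- pv_equiv track=rewrite | github.com/davidtreth/taklow-kernewek | kovtreylyans.py | unpacklisttuples
-- ===== SOURCE A (Python) =====
-- def unpacklisttuples(tuplelist):
--     """ take a list of tuples, containing the N-grams
--     and format it into a single flat string """
--     punctchars = "!:,.?\"\'"
--     if len(tuplelist) == 1:
--         # if there is only one tuple
--         output = "("
--         for i,w in enumerate(tuplelist[0]):
--             if i > 0 and w not in punctchars:
--                 # put a space between words, except
--                 # if the 'word' is a punctuation
--                 # character or it is the first word
--                 output += " "
--             output += w
--         output += ")"
--     else:
--         # if there are more than one
--         output = ""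
--         for t in tuplelist:
--             output += "("
--             for i,w in enumerate(t):
--                 if i > 0 and w not in punctchars:
--                     output += " "
--                 output += w
--             output += "), "
--             # put a comma and space between each N-gram tuple
--         # but at the end, remove the trailing comma+space
--         output = output[:-2]
--     return output
-- ===== SOURCE B (Python) =====
-- def unpacklisttuples(tuplelist):
--     """take a list of tuples, containing the N-grams,
--     and format it into a single flat string"""
--     punctchars = "!:,.?\"\'"
--
--     def rest(ws):
--         # recursively format the words after the first one of a tuple
--         if not ws:
--             return ""
--         sep = "" if ws[0] in punctchars else " "
--         return sep + ws[0] + rest(ws[1:])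
--
--     def fmt(t):
--         # a tuple is its first word (no space before it) plus the rest
--         if not t:
--             return "()"
--         return "(" + t[0] + rest(t[1:]) + ")"
--
--     def tuples(ts):
--         # recursively interleave ', ' between formatted tuples
--         if not ts:
--             return ""
--         if len(ts) == 1:
--             return fmt(ts[0])
--         return fmt(ts[0]) + ", " + tuples(ts[1:])
--
--     return tuples(tuplelist)
-- ===== Notes on version B (the rewrite author's own statement) =====
-- stated objective: alternative
-- what changed: A iterates with enumerate and an i>0 test, branches on len==1, and trims a trailing ', ' with output[:-2]; B is structural head/tail recursion: the first word/tuple is emitted bare and the recursion on the tail supplies separators, so there is no index, no length branch and no trailing-separator trim.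
import Mathlib
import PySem

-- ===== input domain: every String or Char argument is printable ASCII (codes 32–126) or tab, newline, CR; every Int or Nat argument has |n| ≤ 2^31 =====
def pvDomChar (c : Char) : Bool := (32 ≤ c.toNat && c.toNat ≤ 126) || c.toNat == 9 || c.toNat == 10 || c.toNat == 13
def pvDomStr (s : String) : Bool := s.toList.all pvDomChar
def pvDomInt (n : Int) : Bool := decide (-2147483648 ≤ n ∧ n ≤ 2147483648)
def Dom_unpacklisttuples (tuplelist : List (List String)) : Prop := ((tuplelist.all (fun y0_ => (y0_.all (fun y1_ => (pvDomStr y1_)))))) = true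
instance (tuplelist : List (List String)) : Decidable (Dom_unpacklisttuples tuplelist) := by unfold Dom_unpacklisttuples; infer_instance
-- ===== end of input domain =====

-- B replaces A's enumerate/index loops, len==1 branch and trailing-', ' trim with
-- structural head/tail recursion (objective: simpler). Strings ported as List Char
-- via PySem.Chars; 'w in punctchars' is Python substring membership, PySem.Chars.isIn.

-- ===== PORT A =====
def punctcharsA : List Char := "!:,.?\"'".toList

-- the inner 'for i,w in enumerate(t): …' loop of A, run from an accumulator
def ngramLoopA (t : List String) (init : List Char) : List Char :=
  (PySem.List.enumerate t).foldl
    (fun out iw =>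
      (if iw.1 > 0 && !(PySem.Chars.isIn iw.2.toList punctcharsA) then out ++ [' '] else out)
        ++ iw.2.toList)
    init

def unpacklisttuples (tuplelist : List (List String)) : String :=
  if tuplelist.length == 1 then
    -- output = "("; inner loop; output += ")"
    String.ofList (ngramLoopA tuplelist.headI ['('] ++ [')'])
  else
    -- output = ""; for t in tuplelist: "(" + inner loop + "), "; then output[:-2]
    let out := tuplelist.foldl (fun out t => ngramLoopA t (out ++ ['(']) ++ [')', ',', ' ']) []
    String.ofList (PySem.List.slice out none (some (-2)))

-- ===== PORT B =====
def punctcharsB : List Char := "!:,.?\"'".toList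

-- rest(ws): recursively format the words after the first one of a tuple
def restB : List String → List Char
  | [] => []
  | w :: ws =>
    (if PySem.Chars.isIn w.toList punctcharsB then [] else [' ']) ++ w.toList ++ restB ws

-- fmt(t): first word bare, then the recursive rest, wrapped in parentheses
def fmtB : List String → List Char
  | [] => ['(', ')']
  | w :: ws => ['('] ++ w.toList ++ restB ws ++ [')']

-- tuples(ts): recursively interleave ', ' between formatted tuples
def tuplesB : List (List String) → List Char
  | [] => []
  | [t] => fmtB t
  | t :: ts => fmtB t ++ [',', ' '] ++ tuplesB ts

def unpacklisttuples_alt (tuplelist : List (List String)) : String :=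
  String.ofList (tuplesB tuplelist)

-- ===== PRECONDITION & SPEC =====
def Spec_unpacklisttuples (tuplelist : List (List String)) (out : String) : Prop := out = unpacklisttuples_alt tuplelist
instance (tuplelist : List (List String)) (out : String) : Decidable (Spec_unpacklisttuples tuplelist out) := by unfold Spec_unpacklisttuples; infer_instance

-- ===== CLAIM =====
def Claim_equal_unpacklisttuples : Prop := ∀ (tuplelist : List (List String)), Dom_unpacklisttuples tuplelist → Spec_unpacklisttuples tuplelist (unpacklisttuples tuplelist)

-- ===== LEMMAS AND PROOFS =====

-- A's inner fold over enumerate ws s with s > 0 produces B's recursive rest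
theorem foldl_enum_pos (ws : List String) :
    ∀ (s : Int) (init : List Char), 0 < s →
      (PySem.List.enumerate ws s).foldl
        (fun out iw =>
          (if iw.1 > 0 && !(PySem.Chars.isIn iw.2.toList punctcharsA) then out ++ [' '] else out)
            ++ iw.2.toList)
        init = init ++ restB ws := by
  induction ws with
  | nil => intro s init _; simp [PySem.List.enumerate_nil, restB]
  | cons w ws ih =>
    intro s init hs
    rw [PySem.List.enumerate_cons, List.foldl_cons, ih (s + 1) _ (by omega)]
    have : punctcharsA = punctcharsB := rfl
    by_cases hin : PySem.Chars.isIn w.toList punctcharsB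
    · simp [restB, this, hin, hs]
    · simp [restB, this, hin, hs]

theorem ngramLoopA_fmt (t : List String) (init : List Char) :
    ngramLoopA t (init ++ ['(']) ++ [')'] = init ++ fmtB t := by
  cases t with
  | nil => simp [ngramLoopA, PySem.List.enumerate_nil, fmtB]
  | cons w ws =>
    unfold ngramLoopA
    rw [PySem.List.enumerate_cons, List.foldl_cons]
    simp only [show ¬((0 : Int) > 0) by omega, decide_false, Bool.false_and,
      if_neg (by simp : ¬(false = true)), show (0 : Int) + 1 = 1 from rfl]
    rw [foldl_enum_pos ws 1 _ (by omega)]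
    simp [fmtB]

-- A's multi-tuple fold, with its trailing ', ', equals B's tuples plus that ', '
theorem foldA_eq_tuples (l : List (List String)) (h : l ≠ []) (acc : List Char) :
    l.foldl (fun out t => ngramLoopA t (out ++ ['(']) ++ [')', ',', ' ']) acc
      = acc ++ tuplesB l ++ [',', ' '] := by
  induction l generalizing acc with
  | nil => exact absurd rfl h
  | cons t ts ih =>
    rw [List.foldl_cons]
    have hstep : ngramLoopA t (acc ++ ['(']) ++ [')', ',', ' ']
        = acc ++ fmtB t ++ [',', ' '] := by
      have := ngramLoopA_fmt t acc
      calc ngramLoopA t (acc ++ ['(']) ++ [')', ',', ' ']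
          = (ngramLoopA t (acc ++ ['(']) ++ [')']) ++ [',', ' '] := by simp
        _ = acc ++ fmtB t ++ [',', ' '] := by rw [this]
    rw [hstep]
    cases ts with
    | nil => simp [tuplesB]
    | cons u us =>
      rw [ih (by simp)]
      simp [tuplesB]

theorem slice_drop_two {α : Type} (ys : List α) (a b : α) :
    PySem.List.slice (ys ++ [a, b]) none (some (-2)) = ys := by
  simp [PySem.List.slice, PySem.List.clampIdx]

-- ===== VERDICT =====
theorem unpacklisttuples_spec : Claim_equal_unpacklisttuples := by
  intro tuplelist _
  unfold Spec_unpacklisttuples unpacklisttuples unpacklisttuples_alt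
  by_cases hlen : tuplelist.length = 1
  · obtain ⟨t, rfl⟩ := List.length_eq_one_iff.1 hlen
    have := ngramLoopA_fmt t []
    simp only [List.nil_append] at this
    simp [List.headI, this, tuplesB]
  · simp only [beq_iff_eq, hlen, if_false]
    cases tuplelist with
    | nil => rfl
    | cons t ts =>
      rw [foldA_eq_tuples (t :: ts) (by simp) [], List.nil_append, slice_drop_two]
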